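-- pv_equiv track=rewrite | github.com/kaeng2/TIL | SWEA/6190.py | is_mono_inc
-- ===== SOURCE A (Python) =====
-- def is_mono_inc(number):
--     nxt = number // 10
--     prev = number % 10
--     while nxt > 0:
--         now = nxt % 10
--         if prev < now:
--             return 0
--         prev = now
--         nxt //= 10
--     return 1
-- ===== SOURCE B (Python) =====
-- def is_mono_inc(number):
--     digits = [number % 10]
--     n = number // 10
--     while n > 0:
--         digits.append(n % 10)
--         n //= 10
--     return 1 if digits == sorted(digits, reverse=True) else 0
-- ===== Notes on version B (the rewrite author's own statement) =====
-- stated objective: alternative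
-- what changed: Replaces A's fused extract-and-compare loop by two phases: collect all digits (least-significant first) into a list, then decide by comparing the list with its descending sort.
import Mathlib
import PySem

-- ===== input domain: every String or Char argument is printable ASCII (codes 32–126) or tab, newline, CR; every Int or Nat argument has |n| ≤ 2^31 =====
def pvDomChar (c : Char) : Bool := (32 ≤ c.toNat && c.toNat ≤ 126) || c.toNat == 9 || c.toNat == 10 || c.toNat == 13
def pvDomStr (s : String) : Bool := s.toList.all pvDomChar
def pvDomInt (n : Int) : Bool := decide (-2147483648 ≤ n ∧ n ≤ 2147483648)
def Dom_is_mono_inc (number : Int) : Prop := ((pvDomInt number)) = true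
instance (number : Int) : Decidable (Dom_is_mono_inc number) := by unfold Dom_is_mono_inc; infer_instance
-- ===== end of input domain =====

-- B collects the digits first and then compares with the descending sort instead of A's fused scan (objective: alternative decomposition).

-- ===== PORT A =====
-- the while loop of A: state (prev, nxt)
def pvLoopA (prev nxt : Int) : Int :=
  if h : nxt > 0 then
    let now := PySem.Int.mod nxt 10
    if prev < now then 0
    else pvLoopA now (PySem.Int.floordiv nxt 10)
  else 1
termination_by nxt.toNat
decreasing_by
  have : PySem.Int.floordiv nxt 10 = nxt / 10 := PySem.Int.floordiv_eq_ediv_of_pos (by omega)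
  rw [this]
  omega

def is_mono_inc (number : Int) : Int :=
  pvLoopA (PySem.Int.mod number 10) (PySem.Int.floordiv number 10)

-- ===== PORT B =====
-- the digit-collecting while loop of B (digits appended least-significant first)
def pvDigitsB (n : Int) : List Int :=
  if h : n > 0 then PySem.Int.mod n 10 :: pvDigitsB (PySem.Int.floordiv n 10)
  else []
termination_by n.toNat
decreasing_by
  have : PySem.Int.floordiv n 10 = n / 10 := PySem.Int.floordiv_eq_ediv_of_pos (by omega)
  rw [this]
  omega

def is_mono_inc_alt (number : Int) : Int :=
  let digits := PySem.Int.mod number 10 :: pvDigitsB (PySem.Int.floordiv number 10)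
  if digits = PySem.List.sorted digits (fun x => x) true then 1 else 0

-- ===== PRECONDITION & SPEC =====
def Spec_is_mono_inc (number : Int) (out : Int) : Prop := out = is_mono_inc_alt number
instance (number : Int) (out : Int) : Decidable (Spec_is_mono_inc number out) := by unfold Spec_is_mono_inc; infer_instance

-- ===== CLAIM (what is proved, stated in full; the proofs are below) =====
def Claim_equal_is_mono_inc : Prop := ∀ (number : Int), Dom_is_mono_inc number → Spec_is_mono_inc number (is_mono_inc number)

-- ===== LEMMAS AND PROOFS =====

-- A's loop returns 1 exactly when prev followed by the remaining digits is non-increasing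
theorem pvLoopA_eq_pairwise (prev nxt : Int) :
    pvLoopA prev nxt =
      if (prev :: pvDigitsB nxt).Pairwise (fun a b : Int => b ≤ a) then 1 else 0 := by
  induction prev, nxt using pvLoopA.induct with
  | case1 prev nxt h now hlt =>
    have hnow : now = PySem.Int.mod nxt 10 := rfl
    rw [hnow] at hlt
    rw [pvLoopA, pvDigitsB]
    simp only [h, dif_pos]
    rw [if_pos hlt, if_neg]
    intro hp
    have := (List.pairwise_cons.mp hp).1 (PySem.Int.mod nxt 10) (List.mem_cons_self ..)
    omega
  | case2 prev nxt h now hge ih =>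
    have hnow : now = PySem.Int.mod nxt 10 := rfl
    rw [hnow] at hge ih
    rw [pvLoopA, pvDigitsB]
    simp only [h, dif_pos]
    rw [if_neg hge, ih]
    by_cases hp : (now :: pvDigitsB (PySem.Int.floordiv nxt 10)).Pairwise (fun a b : Int => b ≤ a)
    · rw [if_pos hp, if_pos]
      refine List.pairwise_cons.mpr ⟨?_, hp⟩
      intro b hb
      rcases List.mem_cons.mp hb with rfl | hb'
      · omega
      · have := (List.pairwise_cons.mp hp).1 b hb'
        omega
    · rw [if_neg hp, if_neg]
      intro hp'
      exact hp (List.pairwise_cons.mp hp').2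
  | case3 prev nxt h =>
    rw [pvLoopA, pvDigitsB]
    simp [h]

-- a list equals its descending sort (identity key) iff it is non-increasing
theorem sorted_rev_self_iff (xs : List Int) :
    xs = PySem.List.sorted xs (fun x => x) true ↔ xs.Pairwise (fun a b : Int => b ≤ a) := by
  constructor
  · intro h
    rw [h]
    exact PySem.List.sorted_pairwise_rev xs (fun x => x)
  · intro h
    exact (PySem.List.sorted_rev_eq_self_of_pairwise xs (fun x => x) h).symm

-- ===== VERDICT (by name: the statement is the Claim_ definition above) =====
theorem is_mono_inc_spec : Claim_equal_is_mono_inc := by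
  intro number _
  unfold Spec_is_mono_inc is_mono_inc is_mono_inc_alt
  rw [pvLoopA_eq_pairwise]
  by_cases hp :
      (PySem.Int.mod number 10 :: pvDigitsB (PySem.Int.floordiv number 10)).Pairwise
        (fun a b : Int => b ≤ a)
  · rw [if_pos hp, if_pos ((sorted_rev_self_iff _).mpr hp)]
  · rw [if_neg hp, if_neg (fun h => hp ((sorted_rev_self_iff _).mp h))]
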